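-- pv_equiv track=rewrite | github.com/prathamesh223/Python-Codes | sum_divisible_X.py | sum_divisible_by_x
-- ===== SOURCE A (Python) =====
-- def sum_divisible_by_x(N, X):
--     total_sum = 0
--
--     # The last element calculation needs A[N-1] + A[0]
--     last_element = N + 1  # A[N] = N and A[1] = 1
--
--     # Calculate sums for the first N-1 elements of B
--     for i in range(1, N):
--         sum_pair = i + (i + 1)
--         if sum_pair % X == 0:
--             total_sum += sum_pair
--
--     # Handle the last element
--     if last_element % X == 0:
--         total_sum += last_element
--
--     return total_sum
-- ===== SOURCE B (Python) =====
-- def sum_divisible_by_x(N, X):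
--     # Closed-form: sum the odd multiples of |X| lying in [3, 2N-1] as an
--     # arithmetic series, plus the final pair N+1 when X divides it.
--     total = (N + 1) if (N + 1) % X == 0 else 0
--     M = abs(X)
--     if M % 2 == 1 and N >= 2:
--         hi = (2 * N - 1) // M          # largest k with k*M <= 2N-1
--         if hi % 2 == 0:
--             hi -= 1                    # largest ODD such k
--         lo = 3 if M == 1 else 1        # smallest odd k with k*M >= 3
--         if lo <= hi:
--             total += M * (((hi - lo) // 2 + 1) * ((lo + hi) // 2))
--     return total
-- ===== Notes on version B (the rewrite author's own statement) =====
-- stated objective: faster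
-- what changed: Replaced the O(N) loop over all pairs with an O(1) closed-form arithmetic-series sum of the odd multiples of |X| lying in [3, 2N-1].
import Mathlib
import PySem

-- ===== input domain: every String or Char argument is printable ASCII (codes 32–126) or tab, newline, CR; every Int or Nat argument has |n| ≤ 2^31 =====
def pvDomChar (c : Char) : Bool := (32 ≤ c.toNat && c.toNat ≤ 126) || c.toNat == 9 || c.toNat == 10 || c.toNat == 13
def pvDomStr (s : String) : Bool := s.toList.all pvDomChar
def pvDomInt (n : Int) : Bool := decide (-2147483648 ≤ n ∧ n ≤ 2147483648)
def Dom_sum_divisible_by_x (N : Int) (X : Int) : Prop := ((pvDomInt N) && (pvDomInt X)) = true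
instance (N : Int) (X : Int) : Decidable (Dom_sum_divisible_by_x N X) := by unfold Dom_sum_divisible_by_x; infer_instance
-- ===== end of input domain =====

-- B replaces A's O(N) loop by an O(1) closed-form arithmetic-series sum of the
-- odd multiples of |X| in [3, 2N-1]; equivalence is proved for every X ≠ 0.

-- ===== PORT A =====
def sum_divisible_by_x (N : Int) (X : Int) : Int :=
  let totalSum : Int := 0
  let lastElement : Int := N + 1
  let totalSum : Int :=
    (PySem.List.pyRange 1 N 1).foldl
      (fun acc i =>
        let sumPair := i + (i + 1)
        if PySem.Int.mod sumPair X = 0 then acc + sumPair else acc)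
      totalSum
  if PySem.Int.mod lastElement X = 0 then totalSum + lastElement else totalSum

-- ===== PORT B =====
def sum_divisible_by_x_alt (N : Int) (X : Int) : Int :=
  let total : Int := if PySem.Int.mod (N + 1) X = 0 then N + 1 else 0
  let m : Int := |X|
  if PySem.Int.mod m 2 = 1 ∧ N ≥ 2 then
    let hi : Int := PySem.Int.floordiv (2 * N - 1) m
    let hi : Int := if PySem.Int.mod hi 2 = 0 then hi - 1 else hi
    let lo : Int := if m = 1 then 3 else 1
    if lo ≤ hi then
      total + m * ((PySem.Int.floordiv (hi - lo) 2 + 1) * PySem.Int.floordiv (lo + hi) 2)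
    else total
  else total

-- ===== PRECONDITION & SPEC =====
-- Pre_ excludes exactly X = 0, on which Python A raises ZeroDivisionError.
def Pre_sum_divisible_by_x (N : Int) (X : Int) : Prop := X ≠ 0
instance (N : Int) (X : Int) : Decidable (Pre_sum_divisible_by_x N X) := by
  unfold Pre_sum_divisible_by_x; infer_instance

def pvWitness_sum_divisible_by_x : Int × Int := (10, 3)

def Spec_sum_divisible_by_x (N : Int) (X : Int) (out : Int) : Prop := out = sum_divisible_by_x_alt N X
instance (N : Int) (X : Int) (out : Int) : Decidable (Spec_sum_divisible_by_x N X out) := by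
  unfold Spec_sum_divisible_by_x; infer_instance

-- ===== CLAIM (what is proved, stated in full; the proofs are below) =====
def Claim_equal_sum_divisible_by_x : Prop := ∀ (N : Int) (X : Int), Dom_sum_divisible_by_x N X → Pre_sum_divisible_by_x N X → Spec_sum_divisible_by_x N X (sum_divisible_by_x N X)

-- ===== LEMMAS AND PROOFS =====

-- the loop body of A, with the divisor fixed
def pvStep (X : Int) (acc i : Int) : Int :=
  let sumPair := i + (i + 1)
  if PySem.Int.mod sumPair X = 0 then acc + sumPair else acc

-- smallest odd k with k*M ≥ 3 (for odd M ≥ 1)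
def pvLo (M : Int) : Int := if M = 1 then 3 else 1

-- round down to an odd number, as B's port does
def pvOddify (q : Int) : Int := if PySem.Int.mod q 2 = 0 then q - 1 else q

-- the series value B computes from the largest admissible odd k
def pvSeriesAt (M h : Int) : Int :=
  if pvLo M ≤ h then
    M * ((PySem.Int.floordiv (h - pvLo M) 2 + 1) * PySem.Int.floordiv (pvLo M + h) 2)
  else 0

def pvSeries (M b : Int) : Int := pvSeriesAt M (pvOddify (PySem.Int.floordiv b M))

lemma pvOddify_spec (q : Int) :
    (pvOddify q) % 2 = 1 ∧ q - 1 ≤ pvOddify q ∧ pvOddify q ≤ q := by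
  unfold pvOddify
  rw [PySem.Int.mod_eq_emod_of_pos (by norm_num : (0:Int) < 2)]
  split_ifs <;> omega

-- bracket characterisation of B's hi
lemma pvOddHi_spec (M b : Int) (hM : 0 < M) :
    (pvOddify (PySem.Int.floordiv b M)) % 2 = 1 ∧
    M * (pvOddify (PySem.Int.floordiv b M)) ≤ b ∧
    b < M * (pvOddify (PySem.Int.floordiv b M) + 2) := by
  have hq := (PySem.Int.floordiv_eq_iff_of_pos hM (q := PySem.Int.floordiv b M)).mp rfl
  have ho := pvOddify_spec (PySem.Int.floordiv b M)
  set q := PySem.Int.floordiv b M with hqdef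
  set h := pvOddify q with hhdef
  refine ⟨ho.1, ?_, ?_⟩
  · calc M * h ≤ M * q := by nlinarith [ho.2.2]
      _ ≤ b := by nlinarith [hq.1]
  · calc b < (q + 1) * M := hq.2
      _ ≤ M * (h + 2) := by nlinarith [ho.2.1]

lemma pvOdd_unique (M B h1 h2 : Int) (hM : 0 < M)
    (o1 : h1 % 2 = 1) (o2 : h2 % 2 = 1)
    (a1 : M * h1 ≤ B) (b1 : B < M * (h1 + 2))
    (a2 : M * h2 ≤ B) (b2 : B < M * (h2 + 2)) : h1 = h2 := by
  have l1 : M * h1 < M * (h2 + 2) := lt_of_le_of_lt a1 b2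
  have l2 : M * h2 < M * (h1 + 2) := lt_of_le_of_lt a2 b1
  have c1 : h1 < h2 + 2 := lt_of_mul_lt_mul_left l1 (le_of_lt hM)
  have c2 : h2 < h1 + 2 := lt_of_mul_lt_mul_left l2 (le_of_lt hM)
  omega

-- odd * odd is odd
lemma pvOdd_mul (M h : Int) (hM : M % 2 = 1) (hh : h % 2 = 1) : (M * h) % 2 = 1 := by
  obtain ⟨a, ha⟩ : ∃ a, M = 2 * a + 1 := ⟨M / 2, by omega⟩
  obtain ⟨b, hb⟩ : ∃ b, h = 2 * b + 1 := ⟨h / 2, by omega⟩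
  have : M * h = 2 * (2 * a * b + a + b) + 1 := by rw [ha, hb]; ring
  omega

lemma pvLo_odd (M : Int) : pvLo M % 2 = 1 := by
  unfold pvLo; split_ifs <;> decide

lemma pvSeriesAt_lt (M h : Int) (hlt : h < pvLo M) : pvSeriesAt M h = 0 := by
  unfold pvSeriesAt
  rw [if_neg (by omega)]

-- the two halved divisions inside pvSeriesAt evaluated on h = lo + 2t
lemma pvSeriesAt_closed (M h t : Int) (ht : h = pvLo M + 2 * t) (htn : 0 ≤ t) :
    pvSeriesAt M h = M * ((t + 1) * (pvLo M + t)) := by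
  unfold pvSeriesAt
  rw [if_pos (by omega)]
  have e1 : PySem.Int.floordiv (h - pvLo M) 2 = t := by
    rw [PySem.Int.floordiv_eq_ediv_of_pos (by norm_num : (0:Int) < 2)]; omega
  have e2 : PySem.Int.floordiv (pvLo M + h) 2 = pvLo M + t := by
    rw [PySem.Int.floordiv_eq_ediv_of_pos (by norm_num : (0:Int) < 2)]
    have := pvLo_odd M
    omega
  rw [e1, e2]

-- step of the closed form: going from bound 2n-1 to 2n+1 adds 2n+1 iff M ∣ 2n+1
lemma pvSeries_step (M n : Int) (hM : 0 < M) (hModd : M % 2 = 1) (hn : 1 ≤ n) :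
    pvSeries M (2 * n + 1) =
      pvSeries M (2 * n - 1) + (if M ∣ (2 * n + 1) then 2 * n + 1 else 0) := by
  obtain ⟨o1, a1, b1⟩ := pvOddHi_spec M (2 * n - 1) hM
  obtain ⟨o2, a2, b2⟩ := pvOddHi_spec M (2 * n + 1) hM
  unfold pvSeries
  set h1 := pvOddify (PySem.Int.floordiv (2 * n - 1) M) with hdef1
  set h2 := pvOddify (PySem.Int.floordiv (2 * n + 1) M) with hdef2
  have hlodd := pvLo_odd M
  by_cases hd : M ∣ (2 * n + 1)
  · obtain ⟨c, hc⟩ := hd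
    have hcodd : c % 2 = 1 := by
      rcases Int.emod_two_eq c with hce | hce
      · exfalso
        obtain ⟨d, hdd⟩ : ∃ d, c = 2 * d := ⟨c / 2, by omega⟩
        have : 2 * n + 1 = 2 * (M * d) := by rw [hc, hdd]; ring
        omega
      · exact hce
    have hlo : pvLo M ≤ c := by
      unfold pvLo
      split_ifs with hM1
      · rw [hM1] at hc; omega
      · have hM3 : 3 ≤ M := by omega
        by_contra hcle
        have hc0 : c ≤ 0 := by omega
        nlinarith
    have hh2 : h2 = c :=
      pvOdd_unique M (2 * n + 1) h2 c hM o2 hcodd a2 b2 (le_of_eq hc.symm) (by nlinarith)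
    have hh1 : h1 = c - 2 :=
      pvOdd_unique M (2 * n - 1) h1 (c - 2) hM o1 (by omega) a1 b1 (by nlinarith) (by nlinarith)
    rw [hh1, hh2, if_pos ⟨c, hc⟩]
    by_cases hgap : pvLo M ≤ c - 2
    · obtain ⟨t, ht, htn⟩ : ∃ t, c - 2 = pvLo M + 2 * t ∧ 0 ≤ t :=
        ⟨(c - 2 - pvLo M) / 2, by omega, by omega⟩
      rw [pvSeriesAt_closed M (c - 2) t ht htn,
          pvSeriesAt_closed M c (t + 1) (by omega) (by omega)]
      have hceq : c = pvLo M + 2 * t + 2 := by omega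
      rw [hc, hceq]; ring
    · have hceq : c = pvLo M := by omega
      rw [pvSeriesAt_lt M (c - 2) (by omega),
          pvSeriesAt_closed M c 0 (by omega) le_rfl, hc, hceq]
      ring
  · have hkey : h2 = h1 := by
      have hodd2 : (M * h2) % 2 = 1 := pvOdd_mul M h2 hModd o2
      have hne : M * h2 ≠ 2 * n + 1 := fun he => hd ⟨h2, he.symm⟩
      exact pvOdd_unique M (2 * n - 1) h2 h1 hM o2 o1 (by omega) (by linarith) a1 b1
    rw [hkey, if_neg hd, add_zero]

-- at bounds ≤ 1 the series is empty
lemma pvSeries_base (M b : Int) (hM : 0 < M) (hModd : M % 2 = 1) (hb : b ≤ 1) : pvSeries M b = 0 := by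
  obtain ⟨ho, hle, -⟩ := pvOddHi_spec M b hM
  set h := pvOddify (PySem.Int.floordiv b M) with hh
  apply pvSeriesAt_lt
  unfold pvLo
  split_ifs with h1
  · subst h1; linarith [hle]
  · have hM3 : 3 ≤ M := by omega
    by_contra hc
    have h1h : 1 ≤ h := by omega
    nlinarith

-- even divisor: no odd pair sum is ever divisible
lemma pvLoop_even (X : Int) (hX : X ≠ 0) (heven : |X| % 2 = 0) (l : List Int) (init : Int) :
    l.foldl (pvStep X) init = init := by
  induction l generalizing init with
  | nil => rfl
  | cons x xs ih =>
      have hx : PySem.Int.mod (x + (x + 1)) X ≠ 0 := by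
        rw [Ne, PySem.Int.mod_eq_zero_iff_dvd, ← abs_dvd]
        rintro ⟨k, hk⟩
        obtain ⟨a, ha⟩ : ∃ a, |X| = 2 * a := ⟨|X| / 2, by omega⟩
        have : x + (x + 1) = 2 * (a * k) := by rw [hk, ha]; ring
        omega
      simp only [List.foldl_cons, pvStep, if_neg hx]
      exact ih init

-- odd divisor: the loop sum over range(1, n) equals the closed form at bound 2n-1
lemma pvLoop_odd (X : Int) (hX : X ≠ 0) (hodd : |X| % 2 = 1) (n : Nat) :
    (PySem.List.pyRange 1 (n : Int) 1).foldl (pvStep X) 0 = pvSeries |X| (2 * (n : Int) - 1) := by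
  have hM : 0 < |X| := abs_pos.mpr hX
  induction n with
  | zero =>
      rw [PySem.List.pyRange_one_eq_nil (by norm_num)]
      rw [pvSeries_base _ _ hM hodd (by norm_num)]
      rfl
  | succ n ih =>
      by_cases h1 : 1 ≤ n
      · have hsplit : PySem.List.pyRange 1 ((n : Int) + 1) 1
            = PySem.List.pyRange 1 (n : Int) 1 ++ [(n : Int)] := by
          rw [PySem.List.pyRange_one_succ_right (by exact_mod_cast h1)]
        push_cast
        rw [hsplit, List.foldl_append, ih]
        have hstep := pvSeries_step |X| (n : Int) hM hodd (by exact_mod_cast h1)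
        simp only [List.foldl_cons, List.foldl_nil, pvStep]
        rw [show (n : Int) + ((n : Int) + 1) = 2 * (n : Int) + 1 by ring]
        by_cases hd : |X| ∣ (2 * (n : Int) + 1)
        · rw [if_pos (by rw [PySem.Int.mod_eq_zero_iff_dvd, ← abs_dvd]; exact hd)]
          rw [show 2 * ((n : Int) + 1) - 1 = 2 * (n : Int) + 1 by ring, hstep, if_pos hd]
        · rw [if_neg (by rw [PySem.Int.mod_eq_zero_iff_dvd, ← abs_dvd]; exact hd)]
          rw [show 2 * ((n : Int) + 1) - 1 = 2 * (n : Int) + 1 by ring, hstep, if_neg hd, add_zero]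
      · have hn0 : n = 0 := by omega
        subst hn0
        push_cast
        rw [PySem.List.pyRange_one_eq_nil (by norm_num)]
        rw [pvSeries_base _ _ hM hodd (by norm_num)]
        rfl

-- ===== VERDICT (by name: the statement is the Claim_ definition above) =====
-- the loop of A, reduced to the closed form under B's guard
lemma pvLoop_closed (N X : Int) (hX : X ≠ 0) :
    (PySem.List.pyRange 1 N 1).foldl (pvStep X) 0
      = if PySem.Int.mod |X| 2 = 1 ∧ N ≥ 2
        then pvSeriesAt |X| (pvOddify (PySem.Int.floordiv (2 * N - 1) |X|)) else 0 := by
  have hM : 0 < |X| := abs_pos.mpr hX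
  have hm2 : PySem.Int.mod |X| 2 = |X| % 2 :=
    PySem.Int.mod_eq_emod_of_pos (by norm_num : (0:Int) < 2)
  split_ifs with hg
  · obtain ⟨hodd, hN2⟩ := hg
    rw [hm2] at hodd
    have hNc : ((N.toNat : Int)) = N := Int.toNat_of_nonneg (by omega)
    have := pvLoop_odd X hX hodd N.toNat
    rw [hNc] at this
    exact this
  · rw [Decidable.not_and_iff_or_not] at hg
    rcases hg with hpar | hN2
    · rw [hm2] at hpar
      have heven : |X| % 2 = 0 := by omega
      exact pvLoop_even X hX heven _ 0
    · rw [PySem.List.pyRange_one_eq_nil (by omega)]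
      rfl

theorem sum_divisible_by_x_spec : Claim_equal_sum_divisible_by_x := by
  unfold Claim_equal_sum_divisible_by_x
  intro N X _ hX
  unfold Spec_sum_divisible_by_x sum_divisible_by_x sum_divisible_by_x_alt
  simp only []
  rw [show (PySem.List.pyRange 1 N 1).foldl
        (fun acc i => let sumPair := i + (i + 1);
          if PySem.Int.mod sumPair X = 0 then acc + sumPair else acc) 0
      = (PySem.List.pyRange 1 N 1).foldl (pvStep X) 0 from rfl]
  rw [pvLoop_closed N X hX]
  by_cases hg : PySem.Int.mod |X| 2 = 1 ∧ N ≥ 2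
  · rw [if_pos hg, if_pos hg]
    by_cases hle : (if |X| = 1 then (3:Int) else 1)
        ≤ (if PySem.Int.mod (PySem.Int.floordiv (2 * N - 1) |X|) 2 = 0
           then PySem.Int.floordiv (2 * N - 1) |X| - 1
           else PySem.Int.floordiv (2 * N - 1) |X|)
    · rw [if_pos hle]
      rw [show pvSeriesAt |X| (pvOddify (PySem.Int.floordiv (2 * N - 1) |X|))
          = if (if |X| = 1 then (3:Int) else 1)
              ≤ (if PySem.Int.mod (PySem.Int.floordiv (2 * N - 1) |X|) 2 = 0
                 then PySem.Int.floordiv (2 * N - 1) |X| - 1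
                 else PySem.Int.floordiv (2 * N - 1) |X|)
            then |X| * ((PySem.Int.floordiv
                ((if PySem.Int.mod (PySem.Int.floordiv (2 * N - 1) |X|) 2 = 0
                  then PySem.Int.floordiv (2 * N - 1) |X| - 1
                  else PySem.Int.floordiv (2 * N - 1) |X|)
                 - (if |X| = 1 then (3:Int) else 1)) 2 + 1)
              * PySem.Int.floordiv
                ((if |X| = 1 then (3:Int) else 1)
                 + (if PySem.Int.mod (PySem.Int.floordiv (2 * N - 1) |X|) 2 = 0
                    then PySem.Int.floordiv (2 * N - 1) |X| - 1
                    else PySem.Int.floordiv (2 * N - 1) |X|)) 2)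
            else 0 from rfl]
      rw [if_pos hle]
      split_ifs <;> ring
    · rw [if_neg hle]
      rw [show pvSeriesAt |X| (pvOddify (PySem.Int.floordiv (2 * N - 1) |X|)) = 0 from
        if_neg hle]
      split_ifs <;> ring
  · rw [if_neg hg, if_neg hg]
    split_ifs <;> ring
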